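-- pv_equiv track=rewrite | github.com/Ayhan8286/PhronesisIP | apps/api/app/services/document.py | split_bulk_xml
-- ===== SOURCE A (Python) =====
-- def split_bulk_xml(bulk_xml: str) -> list[str]:
--     """
--     Split a USPTO bulk XML file into individual patent documents.
--     USPTO concatenates multiple patents in a single file with a marker.
--     """
--     # Common delimiters in USPTO bulk files
--     markers = [
--         "<?xml version=",
--         '<!DOCTYPE us-patent-grant',
--         '<!DOCTYPE us-patent-application',
--     ]
--
--     documents = []
--     current_doc = []
--
--     for line in bulk_xml.split("\n"):
--         if any(line.strip().startswith(marker) for marker in markers):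
--             if current_doc:
--                 documents.append("\n".join(current_doc))
--                 current_doc = []
--         current_doc.append(line)
--
--     if current_doc:
--         documents.append("\n".join(current_doc))
--
--     return documents
-- ===== SOURCE B (Python) =====
-- def split_bulk_xml(bulk_xml: str) -> list[str]:
--     """
--     Split a USPTO bulk XML file into individual patent documents.
--     Right-to-left pass: each marker line closes the document it starts,
--     so documents are built back-to-front with no flush/join bookkeeping.
--     """
--     markers = [
--         "<?xml version=",
--         '<!DOCTYPE us-patent-grant',
--         '<!DOCTYPE us-patent-application',
--     ]
--
--     def is_marker(line: str) -> bool: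
--         return any(line.strip().startswith(marker) for marker in markers)
--
--     documents = []
--     tail = None  # document text accumulated below the current position, if any
--     for line in reversed(bulk_xml.split("\n")):
--         tail = line if tail is None else line + "\n" + tail
--         if is_marker(line):
--             documents.insert(0, tail)
--             tail = None
--     if tail is not None:
--         documents.insert(0, tail)
--     return documents
-- ===== Notes on version B (the rewrite author's own statement) =====
-- stated objective: alternative
-- what changed: Replaces A's forward accumulator (collect lines, flush and join on each marker, final flush) with a single reversed pass that concatenates each line onto the pending tail string and closes a document whenever a marker line is reached, building the result back-to-front.
import Mathlib
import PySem

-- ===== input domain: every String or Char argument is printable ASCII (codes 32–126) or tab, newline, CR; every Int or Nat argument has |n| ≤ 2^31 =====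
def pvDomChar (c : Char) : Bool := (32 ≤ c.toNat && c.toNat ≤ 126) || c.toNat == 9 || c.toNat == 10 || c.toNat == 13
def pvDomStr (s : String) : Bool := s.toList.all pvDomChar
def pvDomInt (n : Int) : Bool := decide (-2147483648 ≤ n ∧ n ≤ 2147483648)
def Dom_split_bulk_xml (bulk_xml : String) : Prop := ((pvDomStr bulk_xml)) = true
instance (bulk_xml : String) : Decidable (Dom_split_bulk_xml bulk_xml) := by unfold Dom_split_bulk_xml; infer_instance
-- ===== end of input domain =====

-- B replaces A's forward flush-on-marker accumulator with one reversed pass that builds each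
-- document back-to-front (a marker line closes the document it starts); objective: alternative.

-- ===== PORT A =====
-- shared helper: Python's s.split("\n"); the separator is a nonempty literal, so split? never fails
def pvLines (s : String) : List String := (PySem.Str.split? s "\n").getD []

def pvMarkers : List String :=
  ["<?xml version=", "<!DOCTYPE us-patent-grant", "<!DOCTYPE us-patent-application"]

def split_bulk_xml (bulk_xml : String) : List String :=
  let st := (pvLines bulk_xml).foldl
    (fun (st : List String × List String) (line : String) =>
      let st :=
        if pvMarkers.any (fun marker => PySem.Str.startswith (PySem.Str.strip line) marker) then
          if st.2 ≠ [] then (st.1 ++ [PySem.Str.join "\n" st.2], ([] : List String))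
          else st
        else st
      (st.1, st.2 ++ [line]))
    ([], [])
  if st.2 ≠ [] then st.1 ++ [PySem.Str.join "\n" st.2] else st.1

-- ===== PORT B =====
def pvIsMarker (line : String) : Bool :=
  pvMarkers.any (fun marker => PySem.Str.startswith (PySem.Str.strip line) marker)

def split_bulk_xml_alt (bulk_xml : String) : List String :=
  let st := ((pvLines bulk_xml).reverse).foldl
    (fun (st : List String × Option String) (line : String) =>
      let tail := match st.2 with
        | none => line
        | some t => line ++ "\n" ++ t
      if pvIsMarker line then (tail :: st.1, none) else (st.1, some tail))
    ([], none)
  match st.2 with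
  | some t => t :: st.1
  | none => st.1

-- ===== PRECONDITION & SPEC =====
def Spec_split_bulk_xml (bulk_xml : String) (out : List String) : Prop := out = split_bulk_xml_alt bulk_xml
instance (bulk_xml : String) (out : List String) : Decidable (Spec_split_bulk_xml bulk_xml out) := by unfold Spec_split_bulk_xml; infer_instance

-- ===== CLAIM (what is proved, stated in full; the proofs are below) =====
def Claim_equal_split_bulk_xml : Prop := ∀ (bulk_xml : String), Dom_split_bulk_xml bulk_xml → Spec_split_bulk_xml bulk_xml (split_bulk_xml bulk_xml)

-- ===== LEMMAS AND PROOFS =====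

-- A's loop step and finalizer, named for the proofs (definitionally the port's lambda)
def pvStepA (st : List String × List String) (line : String) : List String × List String :=
  let st :=
    if pvIsMarker line then
      if st.2 ≠ [] then (st.1 ++ [PySem.Str.join "\n" st.2], ([] : List String))
      else st
    else st
  (st.1, st.2 ++ [line])

def pvFinA (st : List String × List String) : List String :=
  if st.2 ≠ [] then st.1 ++ [PySem.Str.join "\n" st.2] else st.1

-- B's loop step and finalizer
def pvStepB (st : List String × Option String) (line : String) : List String × Option String :=
  let tail := match st.2 with
    | none => line
    | some t => line ++ "\n" ++ t
  if pvIsMarker line then (tail :: st.1, none) else (st.1, some tail)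

def pvFinB (st : List String × Option String) : List String :=
  match st.2 with
  | some t => t :: st.1
  | none => st.1

-- the common recursive shape both loops compute
def pvG : List String → List String → List String
  | cur, [] => [PySem.Str.join "\n" cur]
  | cur, l :: rest =>
      if pvIsMarker l then PySem.Str.join "\n" cur :: pvG [l] rest
      else pvG (cur ++ [l]) rest

theorem pv_join_singleton (l : String) : PySem.Str.join "\n" [l] = l := by
  rw [← String.toList_inj, PySem.Str.toList_join, List.map_cons, List.map_nil,
      PySem.Chars.join_singleton]

theorem pv_chars_join_snoc (sep p : List Char) (parts : List (List Char)) (h : parts ≠ []) :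
    PySem.Chars.join sep (parts ++ [p]) = PySem.Chars.join sep parts ++ sep ++ p := by
  induction parts with
  | nil => exact absurd rfl h
  | cons q qs ih =>
    cases qs with
    | nil => simp [PySem.Chars.join_cons_cons, PySem.Chars.join_singleton]
    | cons r rs =>
      have ih' := ih (by simp)
      simp only [List.cons_append] at ih' ⊢
      rw [PySem.Chars.join_cons_cons, ih', PySem.Chars.join_cons_cons]
      simp [List.append_assoc]

theorem pv_join_snoc (cur : List String) (l : String) (h : cur ≠ []) :
    PySem.Str.join "\n" (cur ++ [l]) = PySem.Str.join "\n" cur ++ "\n" ++ l := by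
  rw [← String.toList_inj]
  rw [String.toList_append, String.toList_append, PySem.Str.toList_join, PySem.Str.toList_join,
      List.map_append, List.map_cons, List.map_nil]
  exact pv_chars_join_snoc "\n".toList l.toList (List.map String.toList cur)
    (fun hc => h (List.map_eq_nil_iff.mp hc))

theorem pvA_invariant (ls : List String) :
    ∀ (docs cur : List String), cur ≠ [] →
    pvFinA (ls.foldl pvStepA (docs, cur)) = docs ++ pvG cur ls := by
  induction ls with
  | nil =>
    intro docs cur h
    simp [pvFinA, pvG, h]
  | cons l rest ih =>
    intro docs cur h
    rw [List.foldl_cons]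
    by_cases hm : pvIsMarker l = true
    · have hstep : pvStepA (docs, cur) l = (docs ++ [PySem.Str.join "\n" cur], [l]) := by
        simp [pvStepA, hm, h]
      rw [hstep, ih _ _ (by simp)]
      simp [pvG, hm]
    · have hstep : pvStepA (docs, cur) l = (docs, cur ++ [l]) := by
        simp [pvStepA, hm]
      rw [hstep, ih _ _ (by simp)]
      simp [pvG, hm]

theorem pvB_main (ls : List String) :
    ∀ (cur : List String), cur ≠ [] →
    pvG cur ls =
      (match ls.foldr (fun l st => pvStepB st l) (([], none) : List String × Option String) with
       | (d, none) => PySem.Str.join "\n" cur :: d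
       | (d, some c) => (PySem.Str.join "\n" cur ++ "\n" ++ c) :: d) := by
  induction ls with
  | nil => intro cur _; rfl
  | cons l rest ih =>
    intro cur h
    rcases hR : rest.foldr (fun l st => pvStepB st l) (([], none) : List String × Option String)
      with ⟨d, c⟩
    rw [List.foldr_cons, hR]
    by_cases hm : pvIsMarker l = true
    · have hG : pvG cur (l :: rest) = PySem.Str.join "\n" cur :: pvG [l] rest := by
        simp [pvG, hm]
      rw [hG, ih [l] (by simp), hR]
      cases c <;> simp [pvStepB, hm, pv_join_singleton]
    · have hG : pvG cur (l :: rest) = pvG (cur ++ [l]) rest := by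
        simp [pvG, hm]
      rw [hG, ih (cur ++ [l]) (by simp), hR]
      cases c with
      | none => simp [pvStepB, hm, pv_join_snoc cur l h]
      | some t => simp [pvStepB, hm, pv_join_snoc cur l h, String.append_assoc]

theorem pvEq (b : String) : split_bulk_xml b = split_bulk_xml_alt b := by
  have hA : split_bulk_xml b = pvFinA ((pvLines b).foldl pvStepA ([], [])) := rfl
  have hB : split_bulk_xml_alt b
      = pvFinB (((pvLines b).reverse).foldl pvStepB ([], none)) := rfl
  rw [hA, hB, List.foldl_reverse]
  cases hls : pvLines b with
  | nil => rfl
  | cons l rest =>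
    have h1 : pvStepA (([], []) : List String × List String) l = ([], [l]) := by
      by_cases hm : pvIsMarker l = true <;> simp [pvStepA, hm]
    rw [List.foldl_cons, h1, pvA_invariant rest [] [l] (by simp), List.nil_append]
    rw [List.foldr_cons]
    rcases hR : rest.foldr (fun x st => pvStepB st x) (([], none) : List String × Option String)
      with ⟨d, c⟩
    have h2 := pvB_main rest [l] (by simp)
    rw [hR] at h2
    rw [h2]
    cases c <;> by_cases hm : pvIsMarker l = true <;>
      simp [pvStepB, pvFinB, hm, pv_join_singleton]

-- ===== VERDICT (by name: the statement is the Claim_ definition above) =====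
theorem split_bulk_xml_spec : Claim_equal_split_bulk_xml := by
  intro b _
  show split_bulk_xml b = split_bulk_xml_alt b
  exact pvEq b
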